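-- pv_equiv track=rewrite | github.com/teodor-cotet/DiacriticsRestoration | baseline_model.py | bkt_all_words
-- ===== SOURCE A (Python) =====
-- from typing import List
--
-- map_char_to_possible_chars = {
-- 	'a': ['ă', 'â', 'a'],
-- 	'i': ['î', 'i'],
-- 	's': ['ș', 's'],
-- 	't': ['ț', 't']
-- }
--
-- def bkt_all_words(index: int, clean_word: str, current_word: List) -> List:
--
-- 	if index == len(clean_word):
-- 		word = "".join(current_word)
-- 		return [word]
-- 	else:
-- 		L = []
-- 		c = clean_word[index]
-- 		if c in map_char_to_possible_chars:
-- 			for ch in map_char_to_possible_chars[c]: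
-- 				current_word[index] = ch
-- 				L += bkt_all_words(index + 1, clean_word, current_word)
-- 		else:
-- 			current_word[index] = c
-- 			L += bkt_all_words(index + 1, clean_word, current_word)
-- 		return L
-- ===== SOURCE B (Python) =====
-- from typing import List
--
-- map_char_to_possible_chars = {
-- 	'a': ['ă', 'â', 'a'],
-- 	'i': ['î', 'i'],
-- 	's': ['ș', 's'],
-- 	't': ['ț', 't']
-- }
--
-- def bkt_all_words(index: int, clean_word: str, current_word: List) -> List:
-- 	# Iterative breadth-first product over the positions: keep the list of all
-- 	# partial words (each its own copy) and expand position by position.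
-- 	# Does not mutate current_word.
-- 	words = [list(current_word)]
-- 	for i in range(index, len(clean_word)):
-- 		choices = map_char_to_possible_chars.get(clean_word[i], [clean_word[i]])
-- 		new_words = []
-- 		for w in words:
-- 			for ch in choices:
-- 				w2 = list(w)
-- 				w2[i] = ch
-- 				new_words.append(w2)
-- 		words = new_words
-- 	return ["".join(w) for w in words]
-- ===== Notes on version B (the rewrite author's own statement) =====
-- stated objective: alternative
-- what changed: Replaced the depth-first recursion that mutates one shared current_word buffer by an iterative breadth-first product: keep the list of all partial words (each an independent copy) and expand it position by position, joining at the end; B does not mutate current_word.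
-- outside the precondition, e.g. on bkt_all_words(-1, 'b', ['x', 'y']): A returns ['bb'], B returns ['bb']
import Mathlib
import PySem

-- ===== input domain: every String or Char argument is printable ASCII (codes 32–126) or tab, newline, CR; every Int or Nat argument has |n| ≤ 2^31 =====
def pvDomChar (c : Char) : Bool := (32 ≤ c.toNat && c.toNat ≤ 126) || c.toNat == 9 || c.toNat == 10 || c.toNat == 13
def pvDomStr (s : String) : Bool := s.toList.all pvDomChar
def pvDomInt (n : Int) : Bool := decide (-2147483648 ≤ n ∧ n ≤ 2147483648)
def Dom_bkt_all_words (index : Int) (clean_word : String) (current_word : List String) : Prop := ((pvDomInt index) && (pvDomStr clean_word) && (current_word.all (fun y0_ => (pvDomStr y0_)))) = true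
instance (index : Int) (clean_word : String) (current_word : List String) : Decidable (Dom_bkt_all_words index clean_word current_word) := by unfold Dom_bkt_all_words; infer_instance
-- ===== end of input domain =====

-- B replaces A's depth-first recursion over one shared mutable buffer by an iterative
-- breadth-first product over the positions (an alternative of the same cost); A mutates
-- current_word in place and B does not — the equivalence proved here is about the RETURN
-- value only.

-- ===== PORT A =====
def map_char_to_possible_chars : PySem.Dict Char (List String) :=
  PySem.Dict.ofList [('a', ["ă", "â", "a"]), ('i', ["î", "i"]), ('s', ["ș", "s"]), ('t', ["ț", "t"])]

-- used by the port's termination argument (cited in decreasing_by)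
theorem strGet_some_lt {s : String} {i : Int} {c : Char} (h : PySem.Str.pyGet? s i = some c) :
    i < PySem.Str.len s := by
  by_contra hlt
  have : PySem.Chars.pyGet? s.toList i = none := by
    rw [PySem.Chars.pyGet?, PySem.List.pyGet?_eq_none_iff]
    intro hr
    rcases hr with ⟨_, h2⟩
    rw [PySem.Str.len_eq] at hlt
    omega
  rw [PySem.Str.pyGet?] at h
  rw [this] at h
  simp at h

-- A's recursion, with the mutable current_word threaded as state: returns (L, current_word')
mutual
def bktA_go (clean : String) (index : Int) (cw : List String) : List String × List String :=
  if index = PySem.Str.len clean then ([PySem.Str.join "" cw], cw)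
  else
    match hg : PySem.Str.pyGet? clean index with
    | none => ([], cw)   -- Python raises IndexError here (outside Pre_)
    | some c =>
      match PySem.Dict.get? map_char_to_possible_chars c with
      | some chs => bktA_loop clean index (strGet_some_lt hg) chs [] cw
      | none =>
        match PySem.List.pySet? cw index (String.ofList [c]) with
        | none => ([], cw)   -- Python raises IndexError here (outside Pre_)
        | some cw' =>
          let r := bktA_go clean (index + 1) cw'
          (r.1, r.2)
termination_by ((PySem.Str.len clean - index).toNat, 1, 0)
decreasing_by
  · have := strGet_some_lt hg
    apply Prod.Lex.right
    apply Prod.Lex.left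
    omega
  · have := strGet_some_lt hg
    apply Prod.Lex.left
    omega

def bktA_loop (clean : String) (index : Int) (h : index < PySem.Str.len clean)
    (chs : List String) (L : List String) (cw : List String) : List String × List String :=
  match chs with
  | [] => (L, cw)
  | ch :: rest =>
    match PySem.List.pySet? cw index ch with
    | none => ([], cw)   -- Python raises IndexError here (outside Pre_)
    | some cw' =>
      let r := bktA_go clean (index + 1) cw'
      bktA_loop clean index h rest (L ++ r.1) r.2
termination_by ((PySem.Str.len clean - index).toNat, 0, chs.length)
decreasing_by
  · apply Prod.Lex.left
    omega
  · apply Prod.Lex.right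
    apply Prod.Lex.right
    simp
end

def bkt_all_words (index : Int) (clean_word : String) (current_word : List String) : List String :=
  (bktA_go clean_word index current_word).1

-- ===== PORT B =====
-- the body of B's for-loop over the positions (Python B's loop body, kept as a helper);
-- w2[i] = ch is PySem.List.pySetD (exact under Pre_: Python raises IndexError out of range)
def bktB_step (clean_word : String) (ws : List (List String)) (i : Int) : List (List String) :=
  match PySem.Str.pyGet? clean_word i with
  | none => []   -- Python B raises IndexError here (outside Pre_)
  | some c =>
    let choices := (PySem.Dict.get? map_char_to_possible_chars c).getD [String.ofList [c]]
    ws.foldl (fun new_words w =>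
      choices.foldl (fun nw ch => nw ++ [PySem.List.pySetD w i ch]) new_words) []

def bkt_all_words_alt (index : Int) (clean_word : String) (current_word : List String) : List String :=
  let words :=
    (PySem.List.pyRange index (PySem.Str.len clean_word)).foldl (bktB_step clean_word)
      [current_word]
  words.map (fun w => PySem.Str.join "" w)

-- ===== PRECONDITION & SPEC =====
-- Pre_ excludes the inputs where A raises IndexError (index outside [0, len(clean_word)], or
-- index < len(clean_word) with current_word shorter than clean_word) and the negative start
-- indices, where both programs rely on Python's negative-index wraparound into current_word —
-- accidental behaviour outside the function's contract (see the cited example).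
def Pre_bkt_all_words (index : Int) (clean_word : String) (current_word : List String) : Prop :=
  0 ≤ index ∧ index ≤ PySem.Str.len clean_word ∧
    (index = PySem.Str.len clean_word ∨ PySem.Str.len clean_word ≤ (current_word.length : Int))
instance (index : Int) (clean_word : String) (current_word : List String) : Decidable (Pre_bkt_all_words index clean_word current_word) := by unfold Pre_bkt_all_words; infer_instance
def pvWitness_bkt_all_words : Int × String × List String := (0, "as", ["x", "y"])

def Spec_bkt_all_words (index : Int) (clean_word : String) (current_word : List String) (out : List String) : Prop := out = bkt_all_words_alt index clean_word current_word
instance (index : Int) (clean_word : String) (current_word : List String) (out : List String) : Decidable (Spec_bkt_all_words index clean_word current_word out) := by unfold Spec_bkt_all_words; infer_instance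

-- ===== CLAIM (what is proved, stated in full; the proofs are below) =====
def Claim_equal_bkt_all_words : Prop := ∀ (index : Int) (clean_word : String) (current_word : List String), Dom_bkt_all_words index clean_word current_word → Pre_bkt_all_words index clean_word current_word → Spec_bkt_all_words index clean_word current_word (bkt_all_words index clean_word current_word)
-- ===== LEMMAS AND PROOFS =====

-- the possible characters at a position holding c (dict hit, or the plain character)
def choicesOf (c : Char) : List String :=
  (PySem.Dict.get? map_char_to_possible_chars c).getD [String.ofList [c]]

-- all diacritic combinations of the remaining characters, in A's (and B's) order
def combos : List Char → List String
  | [] => [""]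
  | c :: cs => (choicesOf c).flatMap (fun ch => (combos cs).map (fun s => ch ++ s))

def joinS (l : List String) : String := PySem.Str.join "" l

theorem joinS_nil : joinS [] = "" := rfl

theorem joinS_cons (x : String) (l : List String) : joinS (x :: l) = x ++ joinS l := by
  cases l with
  | nil =>
    show PySem.Str.join "" [x] = x ++ PySem.Str.join "" []
    rw [PySem.Str.join, PySem.Str.join, List.map_cons, List.map_nil,
      PySem.Chars.join_singleton, String.ofList_toList]
    simp
  | cons y r =>
    show PySem.Str.join "" (x :: y :: r) = x ++ PySem.Str.join "" (y :: r)
    rw [PySem.Str.join, PySem.Str.join, List.map_cons (l := y :: r), List.map_cons (l := r),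
      show ("" : String).toList = ([] : List Char) from rfl, PySem.Chars.join_cons_cons]
    rw [List.append_nil, String.ofList_append, String.ofList_toList]

theorem joinS_append (a b : List String) : joinS (a ++ b) = joinS a ++ joinS b := by
  induction a with
  | nil => simp [joinS_nil]
  | cons x t ih => simp [joinS_cons, ih, String.append_assoc]

theorem joinS_take_drop (n : Nat) (l : List String) : joinS l = joinS (l.take n) ++ joinS (l.drop n) := by
  rw [← joinS_append, List.take_append_drop]

theorem pySet?_of_lt {cw : List String} {i : Int} (v : String) (h0 : 0 ≤ i) (h1 : i < cw.length) :
    PySem.List.pySet? cw i v = some (cw.set i.toNat v) := by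
  rw [← Int.toNat_of_nonneg h0] at h1 ⊢
  exact PySem.List.pySet?_natCast cw i.toNat v (by exact_mod_cast h1)

theorem strGet_of_lt {s : String} {i : Int} (h0 : 0 ≤ i) (h1 : i.toNat < s.toList.length) :
    PySem.Str.pyGet? s i = some s.toList[i.toNat] := by
  rw [PySem.Str.pyGet?, PySem.Chars.pyGet?, PySem.List.pyGet?_of_nonneg _ h0]
  exact List.getElem?_eq_getElem h1

theorem take_set_self (l : List String) (j : Nat) (v : String) : (l.set j v).take j = l.take j := by
  rw [List.take_set, List.set_eq_of_length_le (by simp)]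

-- joinS of a snoc
theorem joinS_snoc (l : List String) (x : String) : joinS (l ++ [x]) = joinS l ++ x := by
  rw [joinS_append, joinS_cons, joinS_nil, String.append_empty]

-- the loop of A: one position, all choices, state threaded
theorem loop_spec (clean : String) (j : Nat) (hj : (j : Int) < PySem.Str.len clean)
    (H : ∀ cw' : List String, clean.toList.length ≤ cw'.length →
      (bktA_go clean ((j : Int) + 1) cw').1
        = (combos (clean.toList.drop (j + 1))).map
            (fun s => joinS (cw'.take (j + 1)) ++ s ++ joinS (cw'.drop clean.toList.length))
      ∧ (bktA_go clean ((j : Int) + 1) cw').2.length = cw'.length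
      ∧ (bktA_go clean ((j : Int) + 1) cw').2.take (j + 1) = cw'.take (j + 1)
      ∧ (bktA_go clean ((j : Int) + 1) cw').2.drop clean.toList.length
          = cw'.drop clean.toList.length) :
    ∀ (chs L cw : List String), clean.toList.length ≤ cw.length →
      (bktA_loop clean (j : Int) hj chs L cw).1
        = L ++ chs.flatMap (fun ch => (combos (clean.toList.drop (j + 1))).map
            (fun s => joinS (cw.take j) ++ ch ++ s ++ joinS (cw.drop clean.toList.length)))
      ∧ (bktA_loop clean (j : Int) hj chs L cw).2.length = cw.length
      ∧ (bktA_loop clean (j : Int) hj chs L cw).2.take j = cw.take j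
      ∧ (bktA_loop clean (j : Int) hj chs L cw).2.drop clean.toList.length
          = cw.drop clean.toList.length := by
  intro chs
  induction chs with
  | nil =>
    intro L cw hlen
    rw [bktA_loop]
    simp
  | cons ch rest ih =>
    intro L cw hlen
    have hjn : j < clean.toList.length := by
      rw [PySem.Str.len_eq] at hj; exact_mod_cast hj
    have hjcw : j < cw.length := by omega
    rw [bktA_loop, pySet?_of_lt ch (by positivity) (by exact_mod_cast hjcw)]
    simp only [Int.toNat_natCast]
    set cw1 := cw.set j ch with hcw1
    have hlen1 : clean.toList.length ≤ cw1.length := by rw [hcw1, List.length_set]; exact hlen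
    obtain ⟨Hv, Hl, Ht, Hd⟩ := H cw1 hlen1
    set r := bktA_go clean ((j : Int) + 1) cw1 with hr
    have htake1 : cw1.take (j + 1) = cw.take j ++ [ch] := by
      rw [hcw1, List.take_succ_eq_append_getElem (by simpa using hjcw),
        List.getElem_set_self (by simpa using hjcw), take_set_self]
    have hdrop1 : cw1.drop clean.toList.length = cw.drop clean.toList.length :=
      List.drop_set_of_lt hjn
    obtain ⟨iv, il, it, idr⟩ := ih (L ++ r.1) r.2 (by omega)
    refine ⟨?_, ?_, ?_, ?_⟩
    · have htj : r.2.take j = cw.take j := by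
        have h1 : r.2.take j = (r.2.take (j + 1)).take j := by
          rw [List.take_take]; simp
        rw [h1, Ht, htake1, List.take_append_of_le_length (by simp; omega)]
        simp [List.take_take]
      rw [iv, Hv, htj, Hd, hdrop1, htake1, joinS_snoc]
      simp [List.flatMap_cons, List.append_assoc]
    · rw [il, Hl, hcw1]; simp
    · have h1 : r.2.take j = (r.2.take (j + 1)).take j := by
        rw [List.take_take]; simp
      rw [it, h1, Ht, htake1, List.take_append_of_le_length (by simp; omega)]
      simp [List.take_take]
    · rw [idr, Hd, hdrop1]

-- characterisation of A's recursion: value, and frame of the threaded state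
theorem go_spec : ∀ (k : Nat) (clean : String) (cw : List String),
    k ≤ clean.toList.length → clean.toList.length ≤ cw.length →
    (bktA_go clean ((clean.toList.length : Int) - k) cw).1
      = (combos (clean.toList.drop (clean.toList.length - k))).map
          (fun s => joinS (cw.take (clean.toList.length - k)) ++ s ++ joinS (cw.drop clean.toList.length))
    ∧ (bktA_go clean ((clean.toList.length : Int) - k) cw).2.length = cw.length
    ∧ (bktA_go clean ((clean.toList.length : Int) - k) cw).2.take (clean.toList.length - k)
        = cw.take (clean.toList.length - k)
    ∧ (bktA_go clean ((clean.toList.length : Int) - k) cw).2.drop clean.toList.length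
        = cw.drop clean.toList.length := by
  intro k
  induction k with
  | zero =>
    intro clean cw _ hlen
    rw [bktA_go, if_pos (by rw [PySem.Str.len_eq]; omega)]
    refine ⟨?_, rfl, rfl, rfl⟩
    simp only [Nat.sub_zero, List.drop_length, combos, List.map_cons, List.map_nil]
    rw [show PySem.Str.join "" cw = joinS cw from rfl, joinS_take_drop clean.toList.length cw,
      String.append_empty]
  | succ k ih =>
    intro clean cw hk hlen
    set n := clean.toList.length with hn
    set j := n - (k + 1) with hjdef
    have hidx : (n : Int) - ((k + 1 : Nat) : Int) = ((j : Nat) : Int) := by omega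
    have hjn : j < n := by omega
    have hjcw : j < cw.length := by omega
    have hget : PySem.Str.pyGet? clean ((j : Nat) : Int) = some (clean.toList[j]'hjn) := by
      have := strGet_of_lt (s := clean) (i := ((j : Nat) : Int)) (by positivity)
        (by simpa using hjn)
      simpa using this
    have hdropj : clean.toList.drop j = clean.toList[j]'hjn :: clean.toList.drop (j + 1) :=
      List.drop_eq_getElem_cons hjn
    have hsucc : n - k = j + 1 := by omega
    have hidx1 : ((j : Nat) : Int) + 1 = (n : Int) - (k : Int) := by omega
    have H : ∀ cw' : List String, n ≤ cw'.length →
        (bktA_go clean ((j : Int) + 1) cw').1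
          = (combos (clean.toList.drop (j + 1))).map
              (fun s => joinS (cw'.take (j + 1)) ++ s ++ joinS (cw'.drop n))
        ∧ (bktA_go clean ((j : Int) + 1) cw').2.length = cw'.length
        ∧ (bktA_go clean ((j : Int) + 1) cw').2.take (j + 1) = cw'.take (j + 1)
        ∧ (bktA_go clean ((j : Int) + 1) cw').2.drop n = cw'.drop n := by
      intro cw' hlen'
      have := ih clean cw' (by omega) hlen'
      rw [← hn, ← hidx1, hsucc] at this
      exact this
    rw [hidx, bktA_go, if_neg (by rw [PySem.Str.len_eq, ← hn]; intro hcon; omega)]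
    split
    · next hg => rw [hget] at hg; exact absurd hg (by simp)
    · next c hg =>
      rw [hget] at hg
      injection hg with hc
      subst hc
      split
      · next chs hdict =>
        have hj' : ((j : Nat) : Int) < PySem.Str.len clean := by
          rw [PySem.Str.len_eq, ← hn]; exact_mod_cast hjn
        obtain ⟨lv, ll, lt, ld⟩ := loop_spec clean j hj' H chs [] cw (by omega)
        refine ⟨?_, ll, lt, ld⟩
        rw [lv, List.nil_append, hdropj, combos]
        rw [show choicesOf (clean.toList[j]'hjn) = chs by
          rw [choicesOf, hdict, Option.getD_some]]
        simp [List.map_flatMap, List.map_map, Function.comp_def, String.append_assoc, hn, String.length_toList]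
      · next hdict =>
        rw [pySet?_of_lt _ (by positivity) (by exact_mod_cast hjcw)]
        simp only [Int.toNat_natCast]
        set cw1 := cw.set j (String.ofList [clean.toList[j]'hjn]) with hcw1
        obtain ⟨Hv, Hl, Ht, Hd⟩ := H cw1 (by rw [hcw1, List.length_set]; omega)
        have htake1 : cw1.take (j + 1) = cw.take j ++ [String.ofList [clean.toList[j]'hjn]] := by
          rw [hcw1, List.take_succ_eq_append_getElem (by simpa using hjcw),
            List.getElem_set_self (by simpa using hjcw), take_set_self]
        have hdrop1 : cw1.drop n = cw.drop n := List.drop_set_of_lt hjn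
        refine ⟨?_, ?_, ?_, ?_⟩
        · rw [Hv, htake1, hdrop1, joinS_snoc, hdropj, combos]
          rw [show choicesOf (clean.toList[j]'hjn) = [String.ofList [clean.toList[j]'hjn]] by
            rw [choicesOf, hdict, Option.getD_none]]
          simp [List.map_map, Function.comp_def, String.append_assoc]
        · rw [Hl, hcw1]; simp
        · have h1 : (bktA_go clean ((j : Int) + 1) cw1).2.take j
              = ((bktA_go clean ((j : Int) + 1) cw1).2.take (j + 1)).take j := by
            rw [List.take_take]; simp
          rw [h1, Ht, htake1, List.take_append_of_le_length (by simp; omega)]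
          simp [List.take_take]
        · rw [Hd, hdrop1]

-- B's loop body in flatMap form
theorem bktB_step_eq (clean : String) (ws : List (List String)) (j : Nat)
    (hj : j < clean.toList.length) :
    bktB_step clean ws ((j : Nat) : Int)
      = ws.flatMap (fun w => (choicesOf (clean.toList[j]'hj)).map (fun ch => w.set j ch)) := by
  rw [bktB_step, strGet_of_lt (by positivity) (by simpa using hj)]
  simp only [PySem.List.foldl_append_singleton_eq_map, PySem.List.foldl_append_eq_flatMap,
    List.nil_append, PySem.List.pySetD_natCast, Int.toNat_natCast]
  rfl

-- characterisation of B's fold over the remaining positions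
theorem foldB_spec : ∀ (k : Nat) (clean : String) (ws : List (List String)),
    k ≤ clean.toList.length →
    (∀ w ∈ ws, clean.toList.length ≤ w.length) →
    (((PySem.List.pyRange ((clean.toList.length - k : Nat) : Int)
          ((clean.toList.length : Nat) : Int)).foldl (bktB_step clean) ws).map
        (fun w => PySem.Str.join "" w))
      = ws.flatMap (fun w => (combos (clean.toList.drop (clean.toList.length - k))).map
          (fun s => joinS (w.take (clean.toList.length - k)) ++ s ++ joinS (w.drop clean.toList.length))) := by
  intro k
  induction k with
  | zero =>
    intro clean ws _ _
    rw [show PySem.List.pyRange ((clean.toList.length - 0 : Nat) : Int)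
          ((clean.toList.length : Nat) : Int) = [] by
        simp [PySem.List.pyRange]]
    simp only [List.foldl_nil, Nat.sub_zero, List.drop_length, combos, List.map_cons,
      List.map_nil]
    rw [List.map_eq_flatMap]
    refine List.flatMap_congr (fun w _ => ?_)
    rw [show PySem.Str.join "" w = joinS w from rfl, joinS_take_drop clean.toList.length w,
      String.append_empty]
  | succ k ih =>
    intro clean ws hk hws
    set n := clean.toList.length with hn
    set j := n - (k + 1) with hjdef
    have hjn : j < n := by omega
    have hcons : PySem.List.pyRange ((j : Nat) : Int) ((n : Nat) : Int)
        = ((j : Nat) : Int) :: PySem.List.pyRange ((j + 1 : Nat) : Int) ((n : Nat) : Int) := by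
      rw [PySem.List.pyRange_one_cons (by exact_mod_cast hjn)]
      norm_num
    have hsucc : n - k = j + 1 := by omega
    have hdropj : clean.toList.drop j = clean.toList[j]'(by omega) :: clean.toList.drop (j + 1) :=
      List.drop_eq_getElem_cons (by omega)
    rw [hcons, List.foldl_cons, bktB_step_eq clean ws j (by omega)]
    set ws' := ws.flatMap (fun w => (choicesOf (clean.toList[j]'(by omega))).map
      (fun ch => w.set j ch)) with hws'
    have hws'len : ∀ w ∈ ws', n ≤ w.length := by
      intro w hw
      rw [hws'] at hw
      simp only [List.mem_flatMap, List.mem_map] at hw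
      obtain ⟨w0, hw0, ch, _, hset⟩ := hw
      rw [← hset, List.length_set]
      exact hws w0 hw0
    have hih := ih clean ws' (by omega) hws'len
    rw [← hn, hsucc] at hih
    rw [hih, hws', List.flatMap_assoc]
    refine List.flatMap_congr (fun w hw => ?_)
    have hjw : j < w.length := lt_of_lt_of_le hjn (hws w hw)
    rw [List.flatMap_map, hdropj, combos, List.map_flatMap]
    refine List.flatMap_congr (fun ch _ => ?_)
    have htake1 : (w.set j ch).take (j + 1) = w.take j ++ [ch] := by
      rw [List.take_succ_eq_append_getElem (by simpa using hjw),
        List.getElem_set_self (by simpa using hjw), take_set_self]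
    have hdrop1 : (w.set j ch).drop n = w.drop n := List.drop_set_of_lt hjn
    simp only [Function.comp_def, htake1, hdrop1, joinS_snoc, List.map_map,
      String.append_assoc]

-- B at index = len(clean_word): the loop range is empty
theorem alt_at_len (clean : String) (cw : List String) :
    bkt_all_words_alt (PySem.Str.len clean) clean cw = [PySem.Str.join "" cw] := by
  rw [bkt_all_words_alt,
    show PySem.List.pyRange (PySem.Str.len clean) (PySem.Str.len clean) = [] by
      simp [PySem.List.pyRange]]
  rfl

-- characterisation of B
theorem alt_spec (index : Int) (clean : String) (cw : List String)
    (h0 : 0 ≤ index) (h1 : index ≤ PySem.Str.len clean)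
    (h2 : clean.toList.length ≤ cw.length) :
    bkt_all_words_alt index clean cw
      = (combos (clean.toList.drop index.toNat)).map
          (fun s => joinS (cw.take index.toNat) ++ s ++ joinS (cw.drop clean.toList.length)) := by
  have hlen : PySem.Str.len clean = ((clean.toList.length : Nat) : Int) := PySem.Str.len_eq clean
  have ht : index.toNat ≤ clean.toList.length := by
    rw [hlen] at h1; omega
  have hidx : ((clean.toList.length - (clean.toList.length - index.toNat) : Nat) : Int)
      = index := by omega
  have hsub : clean.toList.length - (clean.toList.length - index.toNat) = index.toNat := by omega
  have := foldB_spec (clean.toList.length - index.toNat) clean [cw] (by omega)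
    (by intro w hw; rw [List.mem_singleton] at hw; rw [hw]; exact h2)
  rw [hidx, hsub] at this
  rw [bkt_all_words_alt, hlen, this]
  simp

-- ===== VERDICT (by name: the statement is the Claim_ definition above) =====
theorem bkt_all_words_spec : Claim_equal_bkt_all_words := by
  intro index clean cw _ hpre
  unfold Spec_bkt_all_words
  obtain ⟨h0, h1, hor⟩ := hpre
  rcases hor with heq | hlen
  · -- index = len(clean): A returns [join(current_word)] at once, and so does B
    rw [bkt_all_words, bktA_go, if_pos heq, heq, alt_at_len]
  · -- len(clean) ≤ len(current_word): both sides are the combos product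
    have h3 : clean.toList.length ≤ cw.length := by
      rw [PySem.Str.len_eq] at hlen; exact_mod_cast hlen
    rw [alt_spec index clean cw h0 h1 h3]
    have hn : (clean.toList.length : Int) - ((clean.toList.length - index.toNat : Nat) : Int) = index := by
      rw [PySem.Str.len_eq] at h1; omega
    have h2 : (clean.toList.length - index.toNat : Nat) ≤ clean.toList.length := by omega
    have hgo := (go_spec (clean.toList.length - index.toNat) clean cw h2 h3).1
    rw [hn] at hgo
    rw [bkt_all_words, hgo]
    have h4 : clean.toList.length - (clean.toList.length - index.toNat) = index.toNat := by
      rw [PySem.Str.len_eq] at h1; omega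
    rw [h4]
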